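-- pv_equiv track=rewrite | github.com/williansantaana/sentiment-financial-markets | scripts/scraping_metrics.py | partition_ranges
-- ===== SOURCE A (Python) =====
-- def partition_ranges(db_size, parts=10):
--     ranges = []
--     base_size = db_size // parts
--     remainder = db_size % parts
--     start = 1
--     for i in range(parts):
--         extra = 1 if i < remainder else 0
--         end = start + base_size + extra - 1
--         ranges.append((start, end))
--         start = end + 1
--     return ranges
-- ===== SOURCE B (Python) =====
-- def partition_ranges(db_size, parts=10):
--     base, rem = divmod(db_size, parts)
--     return [(1 + i * base + min(i, rem), (i + 1) * base + min(i + 1, rem))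
--             for i in range(parts)]
-- ===== Notes on version B (the rewrite author's own statement) =====
-- stated objective: alternative
-- what changed: Replaces the loop threading a running start accumulator with a closed-form per-index formula (start_i = 1 + i*base + min(i, rem)), so each range is computed independently in a comprehension.
import Mathlib
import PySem

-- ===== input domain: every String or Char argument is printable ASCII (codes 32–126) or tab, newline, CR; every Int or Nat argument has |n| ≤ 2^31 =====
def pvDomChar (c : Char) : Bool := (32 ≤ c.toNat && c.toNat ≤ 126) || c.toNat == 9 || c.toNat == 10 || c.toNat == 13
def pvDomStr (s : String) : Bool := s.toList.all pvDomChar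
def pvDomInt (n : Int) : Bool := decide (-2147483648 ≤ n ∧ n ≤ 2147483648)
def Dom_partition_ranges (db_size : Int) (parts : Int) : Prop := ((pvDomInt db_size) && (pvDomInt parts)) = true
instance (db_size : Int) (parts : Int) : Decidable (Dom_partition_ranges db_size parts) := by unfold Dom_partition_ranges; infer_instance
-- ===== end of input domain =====

-- B replaces A's running-start accumulator loop with a closed-form per-index formula; same cost, different decomposition.

-- ===== PORT A =====
-- literal transliteration of A: fold over range(parts) carrying (ranges, start)
def partition_ranges (db_size : Int) (parts : Int) : List (Int × Int) :=
  let base_size := PySem.Int.floordiv db_size parts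
  let remainder := PySem.Int.mod db_size parts
  let res := (PySem.List.pyRange 0 parts 1).foldl
    (fun (st : List (Int × Int) × Int) i =>
      let extra : Int := if i < remainder then 1 else 0
      let e := st.2 + base_size + extra - 1
      (st.1 ++ [(st.2, e)], e + 1)) ([], 1)
  res.1

-- ===== PORT B =====
-- literal transliteration of B: each range computed independently from its index
def partition_ranges_alt (db_size : Int) (parts : Int) : List (Int × Int) :=
  let base := PySem.Int.floordiv db_size parts
  let rem := PySem.Int.mod db_size parts
  (PySem.List.pyRange 0 parts 1).map
    (fun i => (1 + i * base + min i rem, (i + 1) * base + min (i + 1) rem))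

-- ===== PRECONDITION & SPEC =====
-- Pre_ excludes parts = 0, where Python A raises ZeroDivisionError.
def Pre_partition_ranges (db_size : Int) (parts : Int) : Prop := parts ≠ 0
instance (db_size : Int) (parts : Int) : Decidable (Pre_partition_ranges db_size parts) := by unfold Pre_partition_ranges; infer_instance
def pvWitness_partition_ranges : Int × Int := (17, 5)

def Spec_partition_ranges (db_size : Int) (parts : Int) (out : List (Int × Int)) : Prop := out = partition_ranges_alt db_size parts
instance (db_size : Int) (parts : Int) (out : List (Int × Int)) : Decidable (Spec_partition_ranges db_size parts out) := by unfold Spec_partition_ranges; infer_instance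

-- ===== CLAIM =====
def Claim_equal_partition_ranges : Prop := ∀ (db_size : Int) (parts : Int), Dom_partition_ranges db_size parts → Pre_partition_ranges db_size parts → Spec_partition_ranges db_size parts (partition_ranges db_size parts)

-- ===== LEMMAS AND PROOFS =====

-- loop invariant: after folding over range(0, n), the state is the mapped prefix
-- together with start = 1 + n*base + min n rem
theorem partition_ranges_fold (base rem : Int) (hrem : 0 ≤ rem) (n : Nat) :
    (PySem.List.pyRange 0 (n : Int) 1).foldl
      (fun (st : List (Int × Int) × Int) i =>
        let extra : Int := if i < rem then 1 else 0
        let e := st.2 + base + extra - 1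
        (st.1 ++ [(st.2, e)], e + 1)) ([], 1)
    = ((PySem.List.pyRange 0 (n : Int) 1).map
        (fun i => (1 + i * base + min i rem, (i + 1) * base + min (i + 1) rem)),
       1 + (n : Int) * base + min (n : Int) rem) := by
  induction n with
  | zero => simp [PySem.List.pyRange_one_eq_nil]; omega
  | succ n ih =>
    have hsplit : PySem.List.pyRange 0 ((n : Int) + 1) 1
        = PySem.List.pyRange 0 (n : Int) 1 ++ [(n : Int)] :=
      PySem.List.pyRange_one_succ_right (by positivity)
    push_cast
    rw [hsplit, List.foldl_append, List.map_append, ih]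
    simp only [List.foldl_cons, List.foldl_nil, List.map_cons, List.map_nil]
    have h2 : (1 + (n : Int) * base + min (n : Int) rem + base
          + (if (n : Int) < rem then 1 else 0)) - 1
        = ((n : Int) + 1) * base + min ((n : Int) + 1) rem := by
      have hb : ((n : Int) + 1) * base = (n : Int) * base + base := by ring
      rw [hb]
      generalize (n : Int) * base = nb
      split_ifs with h <;> omega
    rw [h2]
    simp only [Prod.mk.injEq]
    exact ⟨trivial, by ring⟩

-- ===== VERDICT =====
theorem partition_ranges_spec : Claim_equal_partition_ranges := by
  intro db_size parts _ hp
  simp only [Spec_partition_ranges, partition_ranges, partition_ranges_alt]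
  rcases lt_trichotomy parts 0 with hneg | hz | hpos
  · rw [PySem.List.pyRange_one_eq_nil hneg.le]
    simp
  · exact absurd hz hp
  · have hrem : 0 ≤ PySem.Int.mod db_size parts := by
      rw [PySem.Int.mod_eq_emod_of_pos hpos]
      exact Int.emod_nonneg _ (by omega)
    have hn : parts = ((parts.toNat : Nat) : Int) := by omega
    rw [hn] at hrem ⊢
    rw [partition_ranges_fold _ _ hrem parts.toNat]
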